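/- GENERATED by mk_final_copies.py from the proof of the farm's unit `start_decoder.ERR` (farm:start_decoder.ERR.1: Lemmas.lean) as the
   re-elaboration sweep compiled it — do not edit. -/
/-
  Lemmas of the proof unit `start_decoder.ERR` (the single epilogue of start_decoder, 0x113b22 – 0x113b79).
  1. the machine side: the steady stack pointer as a word, the six shadow stores as `storesMem … epilogue`;
  2. the shadow layer and the footprint after the stores (`ShadowInv.epilogue_ra`, `storesMem_sameExcept`);
  3. the invariant side: SD.ERR (`Failed`) and SD.12 (`Done`) over the live set WITHOUT the own frame, in the memory after the stores.
-/
import Asan.CheckWalk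
import Vorbis.Spec.Units.start_decoder_ERR

open X86 X86.User Asan Vorbis Vorbis.Spec Vorbis.Spec.StartDecoder

set_option maxRecDepth 4000
set_option maxHeartbeats 4000000

namespace Vorbis.Spec.start_decoder_ERR

/-! ### 1. The machine side -/

/-- The steady stack pointer as a word: `addr (R + k) = RA − j` when `k + j = 1480`. -/
theorem addr_R (g : Ghost) (h : 0x700000 + 1888 ≤ (g.e.reg .rsp).toNat) (k j : Nat) (w : Word) (hw : w.toNat = j)
    (hkj : k + j = 1480) : addr (g.R + k) = g.e.reg .rsp - w := by
  apply UInt64.toNat_inj.mp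
  have hlt := (g.e.reg .rsp).toNat_lt
  unfold Ghost.R Ghost.RA steady addr
  rw [UInt64.toNat_sub, UInt64.toNat_ofNat', hw]
  omega

/-- The shadow address of granule `G + k`, as the walker spells it: `rcx + (C00000H + k)`. -/
theorem epi_shadowAddr (G k : Nat) (w : Word) (hw : w = UInt64.ofNat (0xC00000 + k)) :
    shadowAddr (G + k) = UInt64.ofNat G + w := by
  rw [hw, ← UInt64.ofNat_add]
  unfold shadowAddr
  congr 1
  omega

/-- **The memory after the six shadow stores of the epilogue** (0x113b27 … 0x113b5e, the nest of stores exactly as the walker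
leaves it, `rcx = G` the shadow index of the frame) is `storesMem` of the frame's `epilogue` list (Vorbis/Frames.lean). -/
theorem epi_stores (m : Mem) (G : Nat) :
    ((((((m.writeLE (UInt64.ofNat G + 12582912) 8 0).writeLE (UInt64.ofNat G + 12582920) 8 0).writeLE
      (UInt64.ofNat G + 12582932) 8 0).writeLE (UInt64.ofNat G + 12583060) 8 0).writeLE
        (UInt64.ofNat G + 12583068) 8 0).writeLE (UInt64.ofNat G + 12583076) 4 0) =
      storesMem m G Vorbis.Frames.start_decoder.epilogue := by
  unfold storesMem
  simp only [Vorbis.Frames.start_decoder, List.foldl_cons, List.foldl_nil]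
  rw [epi_shadowAddr G 0 12582912 rfl, epi_shadowAddr G 8 12582920 rfl, epi_shadowAddr G 20 12582932 rfl,
    epi_shadowAddr G 148 12583060 rfl, epi_shadowAddr G 156 12583068 rfl, epi_shadowAddr G 164 12583076 rfl]

/-! ### 2. The shadow layer and the footprint after the stores -/

/-- The numbers of the frame: `R + 50H = RA − 1400`, a multiple of 8, in the stack region. -/
theorem base_eq {u₀ : State} {g : Ghost} {pc : Word} {A : Arena × List Obj} {v : State} (fr : Frame u₀ g pc A v) :
    g.base = g.RA - 1400 ∧ g.RA % 8 = 0 ∧ 0x700000 + 1888 ≤ g.RA ∧ g.RA + 8 ≤ 0x800000 := by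
  obtain ⟨h1, h2, h3⟩ := fr.ra
  simp only [depth] at h2
  unfold Ghost.base Ghost.R steady
  omega

/-- **SH1 – SH8 after the epilogue's six stores** (`ShadowInv.epilogue_ra`): the own frame is popped, the clean stack is bounded by
`RA + 8`, the stack pointer after the `ret`. -/
theorem shadow_after {u₀ : State} {g : Ghost} {pc : Word} {A : Arena × List Obj} {v : State} (fr : Frame u₀ g pc A v) :
    ShadowInv A.2 g.frames (g.RA + 8) (storesMem v.mem ((g.RA - 1400) / 8) Vorbis.Frames.start_decoder.epilogue) := by
  obtain ⟨hb, h8, hlo, hhi⟩ := base_eq fr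
  have hsh := fr.shadow
  unfold Ghost.frames' at hsh
  rw [hb] at hsh
  exact ShadowInv.epilogue_ra (F := Vorbis.Frames.start_decoder) hsh h8 hhi fr.callers

/-- **The epilogue's stores write shadow bytes of the own frame only.** -/
theorem same_after (m : Mem) (RA : Nat) (hhi : RA + 8 ≤ 0x800000) :
    Mem.SameExcept [⟨0xC00000 + (RA - 1400) / 8, 0xC00000 + (RA - 1400) / 8 + 168⟩] m
      (storesMem m ((RA - 1400) / 8) Vorbis.Frames.start_decoder.epilogue) := by
  apply storesMem_sameExcept m ((RA - 1400) / 8) 168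
  · intro s hs
    simp only [Vorbis.Frames.start_decoder, List.mem_cons, List.mem_nil_iff, or_false] at hs
    rcases hs with rfl | rfl | rfl | rfl | rfl | rfl <;> simp only [] <;> omega
  · omega

/-- **The footprint of the whole activation, after the epilogue's stores**: the shadow bytes of the own frame are the last window
of `StartDecoder.writes`. -/
theorem footprint_after {u₀ : State} {g : Ghost} {pc : Word} {A : Arena × List Obj} {v : State} (fr : Frame u₀ g pc A v) :
    Mem.SameExcept (footprint g) g.e.mem (storesMem v.mem ((g.RA - 1400) / 8) Vorbis.Frames.start_decoder.epilogue) := by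
  obtain ⟨hb, h8, hlo, hhi⟩ := base_eq fr
  refine Mem.SameExcept.step_same fr.same (same_after v.mem g.RA hhi) ?_
  intro w hw a h1 h2
  have e : w = ⟨0xC00000 + (g.RA - 1400) / 8, 0xC00000 + (g.RA - 1400) / 8 + 168⟩ := List.mem_singleton.mp hw
  subst e
  simp only at h1 h2
  refine ⟨shadowSpan (g.RA - 1400) (g.RA - 1400 + Vorbis.Frames.start_decoder.size), ?_, ?_, ?_⟩
  · unfold footprint writes Ghost.RA
    simp only [List.mem_cons, true_or, or_true]
  · unfold shadowSpan
    simp only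
    omega
  · unfold shadowSpan
    simp only [Vorbis.Frames.start_decoder]
    omega

/-! ### 3. The invariant side -/

/-- **Every block of the function's predicate is live WITHOUT the own frame**: a setup block is an object of `A.2` (`hA`, from
ArenaOK or ArenaErr); `*f` lies inside an object of the callers (`HandOK.obj`); a fixed object is off the stack region, so its
bytes — live with the own frame — are bytes of objects of `A.2` (`live_others`). -/
theorem live0 {g : Ghost} {A : Arena × List Obj} {top : Nat} {mem : Mem} (hh : g.Hand A)
    (hinv : ShadowInv A.2 g.frames' top mem) (hl : BlkLive (g.Blk A) (g.Live A)) (hlen : g.len ≤ 0x1FF000)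
    (hA : BlkLive A.1.Blk (g.Live0 A)) : BlkLive (g.Blk A) (g.Live0 A) := by
  intro B hB
  rcases hB with hs | hx
  · exact hA B hs
  · rcases List.mem_cons.mp hx with rfl | hfix
    · exact hh.obj.blockLive
    · have hoff := fixed_off_stack g.len hlen B hfix
      have hold := hl B (Or.inr hx)
      rw [Block.live_iff] at hold ⊢
      intro x hx'
      have hxl := hold x hx'
      have hxm : B.base ≤ x ∧ x < B.base + B.size := hx'
      obtain ⟨o, ho, hb⟩ := live_others hinv hxl (by omega)
      exact ⟨o, List.mem_append_right _ ho, hb⟩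

/-- **A memory that differs in shadow bytes only keeps every allocated block**: the blocks lie in the data space, below C00000H. -/
theorem allKept_shadow {Blk : Block → Prop} (hok : BlkOK Blk) {mem mem' : Mem} {lo hi : Nat} (hlo : 0xC00000 ≤ lo)
    (hs : Mem.SameExcept [⟨lo, hi⟩] mem mem') : AllKept Blk mem mem' := by
  apply AllKept.of_sameExcept hok hs
  intro B hB w hw
  have e : w = ⟨lo, hi⟩ := List.mem_singleton.mp hw
  subst e
  have := hok.inside B hB
  simp only
  omega

/-- **SD.ERR after the epilogue**: over the live set without the own frame, in a memory that differs in shadow bytes only. -/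
theorem failed_after {g : Ghost} {A : Arena × List Obj} {top top' : Nat} {mem mem' : Mem} {lo hi : Nat}
    (h : Failed g.len g.f (g.Live A) A mem) (hh : g.Hand A) (hinv : ShadowInv A.2 g.frames' top mem)
    (hinv' : ShadowInv A.2 g.frames top' mem') (hlo : 0xC00000 ≤ lo) (hs : Mem.SameExcept [⟨lo, hi⟩] mem mem') :
    Failed g.len g.f (g.Live0 A) A mem' := by
  obtain ⟨⟨henv, hde, hbits⟩, harena⟩ := h
  have hlen : g.len ≤ 0x1FF000 := hbits.S1.2.2
  have hk : AllKept (blk g.len g.f A) mem mem' := allKept_shadow henv.ok hlo hs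
  have hob : blk g.len g.f A (objBlock g.f) := runBlk_extra List.mem_cons_self
  have hA : BlkLive A.1.Blk (g.Live0 A) := harena.blkLive (fun o ho => List.mem_append_right _ ho)
  refine ⟨⟨⟨hinv'.shadow.covers, henv.ok, live0 hh hinv henv.live hlen hA⟩, ?_, ?_⟩, harena⟩
  · exact DeinitOK.carries _ _ _ _ _ hk (fun _ hb => hb) hob hde
  · exact (groups_laws g.len).bits.carries _ _ _ _ _ hk (fun _ hb => hb) hob hbits

/-- **SD.12 after the epilogue**: over the live set without the own frame, in a memory that differs in shadow bytes only. Every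
group follows by its frame lemma: `*f` and every arena block are kept. -/
theorem done_after {g : Ghost} {A : Arena × List Obj} {top top' : Nat} {mem mem' : Mem} {lo hi : Nat}
    (h : Done g.len g.f (g.Live A) A mem) (hh : g.Hand A) (hinv : ShadowInv A.2 g.frames' top mem)
    (hinv' : ShadowInv A.2 g.frames top' mem') (hlo : 0xC00000 ≤ lo) (hs : Mem.SameExcept [⟨lo, hi⟩] mem mem') :
    Done g.len g.f (g.Live0 A) A mem' := by
  obtain ⟨henv, hv, harena, hnt, hfin, hfirst, A9, A10, ho⟩ := h
  have hlen : g.len ≤ 0x1FF000 := hv.bits.S1.2.2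
  have hk : AllKept (blk g.len g.f A) mem mem' := allKept_shadow henv.ok hlo hs
  have hob : blk g.len g.f A (objBlock g.f) := runBlk_extra List.mem_cons_self
  have hA : BlkLive A.1.Blk (g.Live0 A) := harena.blkLive (fun o ho => List.mem_append_right _ ho)
  have hkA : ∀ B, A.1.Blk B → B.Kept mem mem' := fun B hB => hk B (runBlk_setup hB)
  have heAll : ObjEq [(0, 1808)] mem g.f mem' g.f := ObjEq.of_kept_obj (hk _ hob) (by decide)
  have hC : stb_vorbis.channels mem g.f ≤ 16 := (Real.VorbisOK.config hv).header.HD1.2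
  refine ⟨⟨hinv'.shadow.covers, henv.ok, live0 hh hinv henv.live hlen hA⟩, ?_, ?_, hnt, ?_, ?_, A9, A10, ho.ext9, ho.ext10,
    ?_, ?_, ?_, ?_⟩
  · -- VorbisOK
    exact Real.VorbisOK.carries g.len _ _ _ _ _ hk (fun _ hb => hb) hob hv
  · -- ArenaOK: AR5 reads four fields of `*f`
    exact harena.transfer (heAll.sub (by decide))
  · -- the final test: four fields of `*f`
    obtain ⟨hfits, htop⟩ := hfin
    have e1 : stb_vorbis.setup_offset mem' g.f = stb_vorbis.setup_offset mem g.f := by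
      simp only [vacc, voff]
      exact heAll.i32 _ (by decide)
    have e2 : tmr mem' g.f = tmr mem g.f := by
      unfold tmr
      simp only [vacc, voff]
      exact heAll.u32 _ (by decide)
    have e3 : stb_vorbis.temp_offset mem' g.f = stb_vorbis.temp_offset mem g.f := by
      simp only [vacc, voff]
      exact heAll.i32 _ (by decide)
    have e4 : stb_vorbis.alloc.alloc_buffer_length_in_bytes mem' g.f =
        stb_vorbis.alloc.alloc_buffer_length_in_bytes mem g.f := by
      simp only [vacc, voff]
      exact heAll.i32 _ (by decide)
    constructor
    · rw [e1, e2, e3]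
      exact hfits
    · rw [e3, e4]
      exact htop
  · -- first_decode
    have e5 : stb_vorbis.first_decode mem' g.f = stb_vorbis.first_decode mem g.f := by
      simp only [vacc, voff]
      exact heAll.u8 _ (by decide)
    rw [e5]
    exact hfirst
  · -- the configuration's blocks
    refine Own.frame ho.cfg (heAll.sub ?_) (fun B hB => hkA B (ho.up9 B hB))
    have h9 := Mid.hi_le 9
    intro w hw
    simp only [Own.winsAt, List.mem_cons, List.mem_nil_iff, or_false] at hw
    refine ⟨(0, 1808), List.mem_singleton.mpr rfl, ?_⟩
    rcases hw with rfl | rfl | rfl <;> simp only [] <;> omega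
  · -- M6
    exact ho.m6.transfer (heAll.sub (by decide)) hC (fun _ _ hb => hb)
  · -- FY1: the pointers are fields of `*f`, `values` of every floor lies in the floor block (a block of `A9`)
    have hshape : FloorShape A9.Blk mem g.f := (ho.cfg.floor (by omega)).toFloorShape
    have hkept : (floorBlock mem g.f).Kept mem mem' := hkA _ (ho.up9 _ hshape.FL2)
    apply ho.fy.transfer_of_eq _ _ _ _ _ (fun _ _ hb => hb)
    · simp only [vacc, voff]
      exact heAll.i32 4 (by decide)
    · intro c hc
      simp only [vacc, voff]
      rw [Nat.add_assoc g.f]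
      exact heAll.u64 (1264 + 8 * c) (InWins.of_mem (0, 1808) (by decide) (by omega) (by omega))
    · simp only [vacc, voff]
      exact heAll.i32 176 (by decide)
    · simp only [vacc, voff]
      exact heAll.u64 312 (by decide)
    · intro i hi
      have hg : IsFloor mem g.f (stb_vorbis.floor_config_at mem g.f i) := IsFloor.of_lt hi
      have hek := hshape.elem_kept hg hkept
      have hin := hek.inside
      simp only [] at hin
      exact Floor1.same_values hek.same hin
  · -- M2 – M4
    exact ho.mdct.transfer (heAll.sub (by decide)) (fun B hR => hkA B (ho.mdct.reads_blk hR).1) (fun _ _ hb => hb)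

end Vorbis.Spec.start_decoder_ERR
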